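-- pv_equiv track=rewrite | github.com/Zhenxi-Lin/grounded-engineering-document-workflow-agent | app/ingestion/extractor.py | finalize_cleaned_text
-- ===== SOURCE A (Python) =====
-- def finalize_cleaned_text(lines: list[str]) -> str:
--     compacted: list[str] = []
--     blank_pending = False
--
--     for line in lines:
--         if not line:
--             blank_pending = True
--             continue
--         if blank_pending and compacted:
--             compacted.append("")
--         compacted.append(line)
--         blank_pending = False
--
--     return "\n".join(compacted).strip()
-- ===== SOURCE B (Python) =====
-- def _run_end(lines, j, blank):
--     n = len(lines)
--     while j < n and (not lines[j]) == blank: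
--         j += 1
--     return j
--
--
-- def finalize_cleaned_text(lines: list[str]) -> str:
--     out: list[str] = []
--     i, n = 0, len(lines)
--     while i < n:
--         blank = not lines[i]
--         j = _run_end(lines, i + 1, blank)
--         if blank:
--             out.append("")
--         else:
--             out.extend(lines[i:j])
--         i = j
--     return "\n".join(out).strip()
-- ===== Notes on version B (the rewrite author's own statement) =====
-- stated objective: alternative
-- what changed: Replaces A's per-line blank_pending state machine by a run-wise two-pointer scan that appends one '' per blank run and extends with each non-blank run wholesale, letting the final .strip() erase the leading/trailing blank sentinels.
import Mathlib
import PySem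

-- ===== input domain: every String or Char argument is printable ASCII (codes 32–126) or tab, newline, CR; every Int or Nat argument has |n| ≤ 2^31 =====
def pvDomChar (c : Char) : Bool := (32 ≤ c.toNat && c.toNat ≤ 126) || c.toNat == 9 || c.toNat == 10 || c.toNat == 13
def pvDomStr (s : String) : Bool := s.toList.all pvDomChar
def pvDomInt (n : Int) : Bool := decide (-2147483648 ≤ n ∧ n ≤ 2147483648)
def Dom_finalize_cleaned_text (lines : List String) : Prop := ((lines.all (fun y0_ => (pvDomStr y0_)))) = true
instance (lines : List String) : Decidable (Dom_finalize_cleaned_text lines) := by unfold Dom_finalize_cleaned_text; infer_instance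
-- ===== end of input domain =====

-- B replaces A's per-line blank_pending state machine by a run-wise two-pointer scan
-- (one "" per blank run, extend for non-blank runs; the final strip() erases the
-- boundary sentinels); objective: alternative (same asymptotic cost).

-- ===== PORT A =====
def finalize_cleaned_text (lines : List String) : String :=
  PySem.Str.strip (PySem.Str.join "\n"
    (lines.foldl
      (fun (st : List String × Bool) line =>
        if line == "" then (st.1, true)
        else ((if st.2 && !st.1.isEmpty then st.1 ++ [""] else st.1) ++ [line], false))
      ([], false)).1)

-- ===== PORT B =====
-- _run_end: advance j while the blankness of lines[j] equals `blank`
def pvRunEnd (lines : List String) (j : Nat) (blank : Bool) : Nat :=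
  if _h : j < lines.length then
    if ((lines.getD j "") == "") == blank then pvRunEnd lines (j + 1) blank else j
  else j
termination_by lines.length - j

-- (cited by pvAltGo's decreasing_by)
theorem le_pvRunEnd (lines : List String) (j : Nat) (blank : Bool) :
    j ≤ pvRunEnd lines j blank := by
  fun_induction pvRunEnd <;> omega

-- the while-loop over runs: out gains "" for a blank run, the run's lines otherwise
def pvAltGo (lines : List String) (i : Nat) (out : List String) : List String :=
  if _h : i < lines.length then
    let blank := (lines.getD i "") == ""
    let j := pvRunEnd lines (i + 1) blank
    pvAltGo lines j
      (if blank then out ++ [""]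
       else out ++ PySem.List.slice lines (some (i : Int)) (some (j : Int)))
  else out
termination_by lines.length - i
decreasing_by
  have := le_pvRunEnd lines (i + 1) ((lines.getD i "") == "")
  omega

def finalize_cleaned_text_alt (lines : List String) : String :=
  PySem.Str.strip (PySem.Str.join "\n" (pvAltGo lines 0 []))

-- ===== PRECONDITION & SPEC =====
def Spec_finalize_cleaned_text (lines : List String) (out : String) : Prop := out = finalize_cleaned_text_alt lines
instance (lines : List String) (out : String) : Decidable (Spec_finalize_cleaned_text lines out) := by unfold Spec_finalize_cleaned_text; infer_instance

-- ===== CLAIM (what is proved, stated in full; the proofs are below) =====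
def Claim_equal_finalize_cleaned_text : Prop := ∀ (lines : List String), Dom_finalize_cleaned_text lines → Spec_finalize_cleaned_text lines (finalize_cleaned_text lines)

-- ===== LEMMAS AND PROOFS =====

-- A's loop once something has been emitted: a pending blank inserts one ""
def tailOut : List String → Bool → List String
  | [], _ => []
  | x :: xs, bp =>
    if x == "" then tailOut xs true
    else (if bp then [""] else []) ++ x :: tailOut xs false

-- A's whole compacted list: leading blanks are skipped
def headOut : List String → List String
  | [] => []
  | x :: xs => if x == "" then headOut xs else x :: tailOut xs false

-- B's out list as a recursion over runs
def bOutL : List String → List String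
  | [] => []
  | x :: xs =>
    if x == "" then
      "" :: bOutL (xs.dropWhile (fun y => (y == "") == true))
    else
      (x :: xs.takeWhile (fun y => (y == "") == false)) ++
        bOutL (xs.dropWhile (fun y => (y == "") == false))
termination_by l => l.length
decreasing_by
  all_goals simp only [List.length_cons]
  all_goals exact Nat.lt_succ_of_le (List.length_dropWhile_le _ _)

-- small general list facts
theorem drop_length_takeWhile {α : Type} (l : List α) (p : α → Bool) :
    l.drop (l.takeWhile p).length = l.dropWhile p := by
  induction l with
  | nil => rfl
  | cons x xs ih => by_cases h : p x <;> simp [h, ih]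

theorem take_length_takeWhile {α : Type} (l : List α) (p : α → Bool) :
    l.take (l.takeWhile p).length = l.takeWhile p := by
  induction l with
  | nil => rfl
  | cons x xs ih => by_cases h : p x <;> simp [h, ih]

theorem pred_head_dropWhile {α : Type} (p : α → Bool) (z : α) (ws l : List α)
    (h : l.dropWhile p = z :: ws) : p z = false := by
  induction l with
  | nil => simp at h
  | cons x xs ih =>
    rw [List.dropWhile_cons] at h
    split at h
    · exact ih h
    · rename_i hx; cases h; simpa using hx

-- ===== A-side characterisation =====

theorem aLoop_nonempty (lines : List String) :
    ∀ (acc : List String) (bp : Bool), acc ≠ [] →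
    (lines.foldl
      (fun (st : List String × Bool) line =>
        if line == "" then (st.1, true)
        else ((if st.2 && !st.1.isEmpty then st.1 ++ [""] else st.1) ++ [line], false))
      (acc, bp)).1 = acc ++ tailOut lines bp := by
  induction lines with
  | nil => intro acc bp _; simp [tailOut]
  | cons x xs ih =>
    intro acc bp hacc
    simp only [List.foldl_cons]
    by_cases hx : x == ""
    · rw [if_pos hx]
      simp only [tailOut]
      rw [if_pos hx]
      exact ih acc true hacc
    · rw [if_neg hx]
      simp only [tailOut]
      rw [if_neg hx]
      cases bp with
      | false =>
        rw [if_neg (by simp : ¬((false && !acc.isEmpty) = true))]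
        rw [ih (acc ++ [x]) false (by simp)]
        simp
      | true =>
        have hne : acc.isEmpty = false := by simpa [List.isEmpty_iff] using hacc
        rw [if_pos (by simp [hne] : ((true && !acc.isEmpty) = true))]
        rw [ih (acc ++ [""] ++ [x]) false (by simp)]
        simp

theorem aLoop_empty (lines : List String) :
    ∀ (bp : Bool),
    (lines.foldl
      (fun (st : List String × Bool) line =>
        if line == "" then (st.1, true)
        else ((if st.2 && !st.1.isEmpty then st.1 ++ [""] else st.1) ++ [line], false))
      ([], bp)).1 = headOut lines := by
  induction lines with
  | nil => intro bp; simp [headOut]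
  | cons x xs ih =>
    intro bp
    simp only [List.foldl_cons]
    by_cases hx : x == ""
    · rw [if_pos hx]
      simp only [headOut]
      rw [if_pos hx]
      exact ih true
    · rw [if_neg hx]
      simp only [headOut]
      rw [if_neg hx]
      rw [if_neg (by simp : ¬((bp && !(List.isEmpty [])) = true))]
      rw [show ([] : List String) ++ [x] = [x] from rfl,
          aLoop_nonempty xs [x] false (by simp)]
      rfl

-- ===== B-side characterisation =====

theorem pvRunEnd_spec (lines : List String) (j : Nat) (blank : Bool) :
    pvRunEnd lines j blank =
      j + ((lines.drop j).takeWhile (fun y => (y == "") == blank)).length := by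
  fun_induction pvRunEnd with
  | case1 j h hp ih =>
    rw [List.drop_eq_getElem_cons h, List.takeWhile_cons,
        show lines[j] = lines.getD j "" from (List.getD_eq_getElem lines "" h).symm,
        if_pos hp]
    simp only [List.length_cons]
    omega
  | case2 j h hp =>
    rw [List.drop_eq_getElem_cons h, List.takeWhile_cons,
        show lines[j] = lines.getD j "" from (List.getD_eq_getElem lines "" h).symm,
        if_neg hp]
    simp
  | case3 j h =>
    rw [List.drop_eq_nil_iff.mpr (by omega)]
    simp

theorem pvAltGo_spec (lines : List String) :
    ∀ (i : Nat) (out : List String),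
    pvAltGo lines i out = out ++ bOutL (lines.drop i) := by
  intro i out
  fun_induction pvAltGo with
  | case1 i out h blank j ih =>
    have hdrop : lines.drop i = lines.getD i "" :: lines.drop (i + 1) := by
      rw [List.drop_eq_getElem_cons h, List.getD_eq_getElem lines "" h]
    have hj : j = i + 1 + ((lines.drop (i + 1)).takeWhile (fun y => (y == "") == blank)).length :=
      pvRunEnd_spec lines (i + 1) blank
    simp only [dite_eq_ite] at ih
    rw [ih, hdrop]
    by_cases hb : (lines.getD i "") == ""
    · have hbl : blank = true := hb
      rw [if_pos hbl, bOutL, if_pos hb]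
      have hrest : lines.drop j =
          (lines.drop (i + 1)).dropWhile (fun y => (y == "") == true) := by
        rw [hj, hbl, ← drop_length_takeWhile (lines.drop (i + 1)) (fun y => (y == "") == true),
            ← List.drop_drop]
      rw [hrest]; simp
    · have hbl : blank = false := by simp only [blank]; simpa using hb
      rw [if_neg (by simp [hbl]), bOutL, if_neg hb]
      set t := ((lines.drop (i + 1)).takeWhile (fun y => (y == "") == false)).length with ht
      have hjt : j = i + 1 + t := by rw [hj, hbl, ← ht]
      have hslice : PySem.List.slice lines (some (i : Int)) (some (j : Int)) =
          lines.getD i "" :: (lines.drop (i + 1)).takeWhile (fun y => (y == "") == false) := by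
        rw [show ((j : Int)) = ((j : Nat) : Int) from rfl, PySem.List.slice_natCast, hjt]
        have h1 : i + 1 + t - i = 1 + t := by omega
        rw [h1, hdrop, List.take_cons (by omega)]
        congr 1
        rw [show 1 + t - 1 = t by omega, ht, take_length_takeWhile]
      have hrest : lines.drop j =
          (lines.drop (i + 1)).dropWhile (fun y => (y == "") == false) := by
        rw [hjt, ht, ← drop_length_takeWhile (lines.drop (i + 1)) (fun y => (y == "") == false),
            ← List.drop_drop]
      rw [hslice, hrest]; simp
  | case2 i out h =>
    rw [List.drop_eq_nil_iff.mpr (by omega)]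
    simp [bOutL]

-- ===== relating B's list to A's list =====

theorem bOutL_cons_nonblank (x : String) (xs : List String) (hx : (x == "") = false) :
    bOutL (x :: xs) = x :: bOutL xs := by
  rw [bOutL, if_neg (by simp [hx])]
  cases xs with
  | nil => simp [bOutL]
  | cons y ys =>
    by_cases hy : y == ""
    · rw [List.takeWhile_cons, if_neg (by simp [hy]), List.dropWhile_cons, if_neg (by simp [hy])]
      rw [bOutL, if_pos hy]
      simp
    · rw [List.takeWhile_cons, if_pos (by simp [hy]), List.dropWhile_cons, if_pos (by simp [hy])]
      rw [bOutL, if_neg hy]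
      simp

theorem tailOut_dropWhile (ys : List String) :
    tailOut (ys.dropWhile (fun y => (y == "") == true)) true = tailOut ys true := by
  induction ys with
  | nil => rfl
  | cons y ys ih =>
    by_cases hy : y == ""
    · rw [List.dropWhile_cons, if_pos (by simp [hy]), ih, tailOut, if_pos hy]
    · rw [List.dropWhile_cons, if_neg (by simp [hy])]

theorem headOut_dropWhile (ys : List String) :
    headOut (ys.dropWhile (fun y => (y == "") == true)) = headOut ys := by
  induction ys with
  | nil => rfl
  | cons y ys ih =>
    by_cases hy : y == ""
    · rw [List.dropWhile_cons, if_pos (by simp [hy]), ih, headOut, if_pos hy]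
    · rw [List.dropWhile_cons, if_neg (by simp [hy])]

-- B's list equals A's tail list up to one trailing "" sentinel
theorem bOutL_tailOut : ∀ (n : Nat) (xs : List String), xs.length ≤ n →
    bOutL xs = tailOut xs false ∨ bOutL xs = tailOut xs false ++ [""] := by
  intro n
  induction n with
  | zero =>
    intro xs hxs
    have hnil : xs = [] := List.length_eq_zero_iff.mp (by omega)
    subst hnil; left; simp [bOutL, tailOut]
  | succ n ih =>
    intro xs hxs
    cases xs with
    | nil => left; simp [bOutL, tailOut]
    | cons x xs =>
      by_cases hx : x == ""
      · rw [bOutL, if_pos hx, tailOut, if_pos hx, ← tailOut_dropWhile xs]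
        cases hzs : xs.dropWhile (fun y => (y == "") == true) with
        | nil => right; simp [bOutL, tailOut]
        | cons z ws =>
          have hz : (z == "") = false := by
            simpa using pred_head_dropWhile (fun y => (y == "") == true) z ws xs hzs
          rw [bOutL_cons_nonblank z ws hz, tailOut, if_neg (by simp [hz])]
          have hws : ws.length ≤ n := by
            have h1 := List.length_dropWhile_le (fun y : String => (y == "") == true) xs
            rw [hzs] at h1
            simp only [List.length_cons] at h1 hxs
            omega
          rcases ih ws hws with h | h
          · left; rw [h]; simp
          · right; rw [h]; simp
      · have hx' : (x == "") = false := by simpa using hx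
        rw [bOutL_cons_nonblank x xs hx', tailOut, if_neg hx]
        have hxsn : xs.length ≤ n := by simp only [List.length_cons] at hxs; omega
        rcases ih xs hxsn with h | h
        · left; rw [h]; simp
        · right; rw [h]; simp

-- B's list equals A's list up to one leading and one trailing "" sentinel
theorem bOutL_headOut (lines : List String) :
    ∃ l t : List String, (l = [] ∨ l = [""]) ∧ (t = [] ∨ t = [""]) ∧
      bOutL lines = l ++ headOut lines ++ t := by
  cases lines with
  | nil => exact ⟨[], [], Or.inl rfl, Or.inl rfl, by simp [bOutL, headOut]⟩
  | cons x xs =>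
    by_cases hx : x == ""
    · rw [bOutL, if_pos hx, headOut, if_pos hx, ← headOut_dropWhile xs]
      cases hzs : xs.dropWhile (fun y => (y == "") == true) with
      | nil => exact ⟨[""], [], Or.inr rfl, Or.inl rfl, by simp [bOutL, headOut]⟩
      | cons z ws =>
        have hz : (z == "") = false := by
          simpa using pred_head_dropWhile (fun y => (y == "") == true) z ws xs hzs
        rw [bOutL_cons_nonblank z ws hz, headOut, if_neg (by simp [hz])]
        rcases bOutL_tailOut ws.length ws le_rfl with h | h
        · exact ⟨[""], [], Or.inr rfl, Or.inl rfl, by rw [h]; simp⟩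
        · exact ⟨[""], [""], Or.inr rfl, Or.inr rfl, by rw [h]; simp⟩
    · have hx' : (x == "") = false := by simpa using hx
      rw [bOutL_cons_nonblank x xs hx']
      rcases bOutL_tailOut xs.length xs le_rfl with h | h
      · exact ⟨[], [], Or.inl rfl, Or.inl rfl, by
          rw [h, headOut, if_neg hx]; simp⟩
      · exact ⟨[], [""], Or.inl rfl, Or.inr rfl, by
          rw [h, headOut, if_neg hx]; simp⟩

-- ===== string level: a "\n" at either end is erased by strip =====

theorem strip_cons_nl (cs : List Char) :
    PySem.Chars.strip ('\n' :: cs) = PySem.Chars.strip cs := by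
  simp [PySem.Chars.strip, PySem.Chars.lstrip,
        show PySem.Chars.isspace '\n' = true from by decide]

theorem strip_snoc_nl (cs : List Char) :
    PySem.Chars.strip (cs ++ ['\n']) = PySem.Chars.strip cs := by
  simp only [PySem.Chars.strip, PySem.Chars.lstrip, List.dropWhile_append]
  cases h : List.dropWhile PySem.Chars.isspace cs with
  | nil =>
    simp [PySem.Chars.rstrip, show PySem.Chars.isspace '\n' = true from by decide]
  | cons d ds =>
    simp only [List.isEmpty_cons, Bool.false_eq_true, if_false]
    simp [PySem.Chars.rstrip, List.reverse_append,
          show PySem.Chars.isspace '\n' = true from by decide]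

theorem join_snoc_nil (sep : List Char) (q : List Char) (rest : List (List Char)) :
    PySem.Chars.join sep ((q :: rest) ++ [[]]) = PySem.Chars.join sep (q :: rest) ++ sep := by
  induction rest generalizing q with
  | nil => simp [PySem.Chars.join_cons_cons, PySem.Chars.join_singleton]
  | cons r rs ih =>
    rw [show (q :: r :: rs) ++ [[]] = q :: ((r :: rs) ++ [[]]) from rfl]
    rw [show q :: ((r :: rs) ++ [[]]) = q :: r :: (rs ++ [[]]) from rfl]
    rw [show (q :: r :: (rs ++ [[]])) = q :: ((r :: (rs ++ [[]]))) from rfl]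
    rw [PySem.Chars.join_cons_cons, show (r :: (rs ++ [[]])) = (r :: rs) ++ [[]] from rfl, ih,
        PySem.Chars.join_cons_cons]
    simp

theorem strip_join_snoc (ns : List (List Char)) :
    PySem.Chars.strip (PySem.Chars.join ['\n'] (ns ++ [[]])) =
      PySem.Chars.strip (PySem.Chars.join ['\n'] ns) := by
  cases ns with
  | nil => simp [PySem.Chars.join_singleton, PySem.Chars.join_nil]
  | cons q rest => rw [join_snoc_nil, strip_snoc_nl]

theorem strip_join_cons (ns : List (List Char)) :
    PySem.Chars.strip (PySem.Chars.join ['\n'] ([] :: ns)) =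
      PySem.Chars.strip (PySem.Chars.join ['\n'] ns) := by
  cases ns with
  | nil => simp [PySem.Chars.join_singleton, PySem.Chars.join_nil]
  | cons q rest =>
    rw [PySem.Chars.join_cons_cons, List.nil_append, List.singleton_append, strip_cons_nl]

-- strip (join "\n" (l ++ m ++ t)) = strip (join "\n" m) for boundary sentinels l, t
theorem strip_join_trim (m l t : List String)
    (hl : l = [] ∨ l = [""]) (ht : t = [] ∨ t = [""]) :
    PySem.Str.strip (PySem.Str.join "\n" (l ++ m ++ t)) =
      PySem.Str.strip (PySem.Str.join "\n" m) := by
  apply String.toList_inj.mp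
  rw [PySem.Str.toList_strip, PySem.Str.toList_strip, PySem.Str.toList_join, PySem.Str.toList_join,
      show ("\n" : String).toList = ['\n'] from by decide]
  rcases hl with rfl | rfl <;> rcases ht with rfl | rfl <;>
    simp only [List.map_append, List.map_cons, List.map_nil, List.nil_append, List.append_nil,
               show ("" : String).toList = [] from rfl]
  · exact strip_join_snoc _
  · rw [List.singleton_append, strip_join_cons]
  · rw [strip_join_snoc, List.singleton_append, strip_join_cons]

-- ===== VERDICT (by name: the statement is the Claim_ definition above) =====
theorem finalize_cleaned_text_spec : Claim_equal_finalize_cleaned_text := by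
  intro lines _
  unfold Spec_finalize_cleaned_text finalize_cleaned_text finalize_cleaned_text_alt
  rw [pvAltGo_spec lines 0 [], List.drop_zero, List.nil_append, aLoop_empty lines false]
  obtain ⟨l, t, hl, ht, heq⟩ := bOutL_headOut lines
  rw [heq, strip_join_trim (headOut lines) l t hl ht]
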